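-- pv_equiv track=rewrite | github.com/A-meerdervan/RushHourGit | Gezamenlijk/rushhour_allMoves.py | optionIsSolution
-- ===== SOURCE A (Python) =====
-- EXIT = 22 # LET OP !! 6x6=22 9x9=43 12x12 = 82
--
-- def optionIsSolution(state,occupied):
-- 	#checkt nog te veel maar Alex zeurt
-- 	# print occupied
-- 	arraycounter =[]
-- 	counter = 1
-- 	# print state[-1]
-- 	while state[-1] < EXIT:
-- 		counter += 1
-- 		arraycounter.append(counter)
-- 		state[-1] += 1
-- 	state[-1] = state[-1] - counter + 1
-- 	# print arraycounter
--
-- 	for number in arraycounter: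
-- 		# print number,state[-1]
-- 		tileCheck = state[-1] + number
-- 		# print tileCheck
-- 		if tileCheck in occupied:
-- 			#print 'false'
-- 			return False
-- 	#print 'hier'
-- 	return True
-- ===== SOURCE B (Python) =====
-- EXIT = 22 # LET OP !! 6x6=22 9x9=43 12x12 = 82
--
-- def optionIsSolution(state, occupied):
--     # Quantifier swap: instead of testing each tile ahead of the car for
--     # membership in occupied, scan occupied ONCE and reject any tile that
--     # lies strictly inside the blocking interval (pos+1, EXIT+2),
--     # i.e. pos+2 <= o <= EXIT+1 -- exactly the tiles A checks.
--     # state is never mutated (A restores it, so net effect is identical).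
--     pos = state[-1]
--     for o in occupied:
--         if pos + 1 < o < EXIT + 2:
--             return False
--     return True
-- ===== Notes on version B (the rewrite author's own statement) =====
-- stated objective: alternative
-- what changed: Quantifier swap: instead of A's mutate-and-restore while-loop generating every tile ahead of the car and testing each with 'in occupied', B makes one pass over occupied and tests each occupied tile against the blocking interval (pos+1, EXIT+2); the tile loop disappears and state is never mutated.
import Mathlib
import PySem

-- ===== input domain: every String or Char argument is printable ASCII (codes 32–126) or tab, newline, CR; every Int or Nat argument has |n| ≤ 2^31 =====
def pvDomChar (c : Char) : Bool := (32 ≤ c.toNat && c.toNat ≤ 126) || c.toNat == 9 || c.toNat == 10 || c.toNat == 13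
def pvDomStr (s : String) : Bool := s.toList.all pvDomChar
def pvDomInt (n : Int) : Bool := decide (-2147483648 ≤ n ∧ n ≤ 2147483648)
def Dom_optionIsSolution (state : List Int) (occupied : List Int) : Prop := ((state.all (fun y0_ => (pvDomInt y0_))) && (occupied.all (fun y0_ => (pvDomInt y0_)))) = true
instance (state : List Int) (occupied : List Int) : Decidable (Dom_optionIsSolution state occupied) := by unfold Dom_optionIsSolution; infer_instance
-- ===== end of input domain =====

-- B swaps the quantifier: one pass over occupied testing each tile against the
-- blocking interval (pos+1, EXIT+2), instead of A's tile-by-tile membership scan;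
-- B never mutates state (A restores it, so neither has a net side effect).

-- ===== PORT A =====
-- the while-loop: returns (final state[-1], final counter, arraycounter)
def pvALoop (last counter : Int) (acc : List Int) : Int × Int × List Int :=
  if last < 22 then pvALoop (last + 1) (counter + 1) (acc ++ [counter + 1])
  else (last, counter, acc)
  termination_by (22 - last).toNat
  decreasing_by omega

-- the for-loop over arraycounter with early return False
def pvACheck (arr : List Int) (p : Int) (occ : List Int) : Bool :=
  match arr with
  | [] => true
  | n :: rest => if occ.contains (p + n) then false else pvACheck rest p occ

def optionIsSolution (state : List Int) (occupied : List Int) : Bool :=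
  match PySem.List.pyGet? state (-1) with
  | none => false  -- unreachable under Pre_ (Python raises IndexError)
  | some pos =>
    let r := pvALoop pos 1 []
    pvACheck r.2.2 (r.1 - r.2.1 + 1) occupied

-- ===== PORT B =====
-- Source B's single for-loop over occupied with early return False
def pvBLoop (pos : Int) (occ : List Int) : Bool :=
  match occ with
  | [] => true
  | o :: rest => if pos + 1 < o && o < 22 + 2 then false else pvBLoop pos rest

def optionIsSolution_alt (state : List Int) (occupied : List Int) : Bool :=
  match PySem.List.pyGet? state (-1) with
  | none => false  -- unreachable under Pre_ (Python raises IndexError)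
  | some pos => pvBLoop pos occupied

-- ===== PRECONDITION & SPEC =====
-- Pre_ excludes only the empty state, on which Python A raises IndexError (state[-1]).
def Pre_optionIsSolution (state : List Int) (occupied : List Int) : Prop := state ≠ []
instance (state : List Int) (occupied : List Int) : Decidable (Pre_optionIsSolution state occupied) := by unfold Pre_optionIsSolution; infer_instance
def pvWitness_optionIsSolution : List Int × List Int := ([5, 17], [3, 20])

def Spec_optionIsSolution (state : List Int) (occupied : List Int) (out : Bool) : Prop := out = optionIsSolution_alt state occupied
instance (state : List Int) (occupied : List Int) (out : Bool) : Decidable (Spec_optionIsSolution state occupied out) := by unfold Spec_optionIsSolution; infer_instance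

-- ===== CLAIM (what is proved, stated in full; the proofs are below) =====
def Claim_equal_optionIsSolution : Prop := ∀ (state : List Int) (occupied : List Int), Dom_optionIsSolution state occupied → Pre_optionIsSolution state occupied → Spec_optionIsSolution state occupied (optionIsSolution state occupied)

-- ===== LEMMAS AND PROOFS =====

-- closed form of A's while-loop
lemma pvALoop_eq : ∀ (n : Nat) (last counter : Int) (acc : List Int),
    (22 - last).toNat = n →
    pvALoop last counter acc =
      if last < 22 then
        (22, counter + (22 - last), acc ++ PySem.List.pyRange (counter + 1) (counter + (22 - last) + 1) 1)
      else (last, counter, acc) := by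
  intro n
  induction n with
  | zero =>
    intro last counter acc h
    have h22 : ¬ last < 22 := by omega
    rw [pvALoop]
    simp [h22]
  | succ k ih =>
    intro last counter acc h
    have hlt : last < 22 := by omega
    rw [pvALoop]
    simp only [hlt, if_true]
    rw [ih (last + 1) (counter + 1) (acc ++ [counter + 1]) (by omega)]
    have hc : counter + (22 - last) = (counter + 1) + (22 - (last + 1)) := by ring
    by_cases h2 : last + 1 < 22
    · rw [if_pos h2, hc,
          show acc ++ [counter + 1] ++ PySem.List.pyRange (counter + 1 + 1) (counter + 1 + (22 - (last + 1)) + 1) 1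
             = acc ++ ((counter + 1) :: PySem.List.pyRange (counter + 1 + 1) (counter + 1 + (22 - (last + 1)) + 1) 1) by simp,
          ← PySem.List.pyRange_one_cons (by omega)]
    · have h21 : (22 : Int) - (last + 1) = 0 := by omega
      rw [if_neg h2, hc, h21]
      rw [PySem.List.pyRange_one_cons (by omega)]
      have hemp : PySem.List.pyRange (counter + 1 + 1) (counter + 1 + 0 + 1) 1 = [] := by
        simp [PySem.List.pyRange]
      rw [hemp]
      simp
      omega

-- A's early-return for-loop is an `all`
lemma pvACheck_eq_all (arr : List Int) (p : Int) (occ : List Int) :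
    pvACheck arr p occ = arr.all (fun n => !occ.contains (p + n)) := by
  induction arr with
  | nil => rfl
  | cons n rest ih =>
    rw [pvACheck]
    by_cases h : occ.contains (p + n) <;> simp [h, ih]

-- B's early-return for-loop is an `all`
lemma pvBLoop_eq_all (pos : Int) (occ : List Int) :
    pvBLoop pos occ = occ.all (fun o => !(pos + 1 < o && o < 22 + 2)) := by
  induction occ with
  | nil => rfl
  | cons o rest ih =>
    rw [pvBLoop]
    by_cases h : (pos + 1 < o && o < 22 + 2) = true <;> simp [h, ih] <;> rfl

-- quantifier swap: tiles-scan over the range = interval test over occupied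
lemma pvSwap (pos : Int) (occ : List Int) :
    (PySem.List.pyRange 2 (22 - pos + 2) 1).all (fun n => !occ.contains (pos + n)) =
    occ.all (fun o => !(pos + 1 < o && o < 22 + 2)) := by
  rw [Bool.eq_iff_iff]
  simp only [List.all_eq_true, PySem.List.mem_pyRange_one, Bool.not_eq_eq_eq_not,
    Bool.not_true, List.contains_eq_mem, decide_eq_false_iff_not, Bool.and_eq_false_iff,
    not_lt]
  constructor
  · intro h o ho
    by_cases hin : pos + 1 < o ∧ o < 24
    · have := h (o - pos) ⟨by omega, by omega⟩
      rw [show pos + (o - pos) = o by ring] at this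
      exact absurd ho this
    · omega
  · intro h n hn hmem
    have := h _ hmem
    omega

-- ===== VERDICT (by name: the statement is the Claim_ definition above) =====
theorem optionIsSolution_spec : Claim_equal_optionIsSolution := by
  intro state occupied _ hpre
  unfold Spec_optionIsSolution optionIsSolution optionIsSolution_alt
  cases hget : PySem.List.pyGet? state (-1) with
  | none =>
    exfalso
    rw [PySem.List.pyGet?_neg_one] at hget
    exact hpre (List.getLast?_eq_none_iff.mp hget)
  | some pos =>
    simp only
    rw [pvBLoop_eq_all]
    by_cases hlt : pos < 22
    · rw [pvALoop_eq (22 - pos).toNat pos 1 [] rfl]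
      simp only [hlt, if_true]
      rw [pvACheck_eq_all]
      have hpr : (22 : Int) - (1 + (22 - pos)) + 1 = pos := by ring
      rw [hpr]
      have h1 : (1 : Int) + 1 = 2 := by norm_num
      have h2 : (1 : Int) + (22 - pos) + 1 = 22 - pos + 2 := by ring
      rw [h1, h2, List.nil_append, pvSwap]
    · rw [pvALoop_eq (22 - pos).toNat pos 1 [] rfl]
      simp only [hlt, if_false]
      have hB : occupied.all (fun o => !(pos + 1 < o && o < 22 + 2)) = true := by
        simp only [List.all_eq_true, Bool.not_eq_eq_eq_not, Bool.not_true,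
          Bool.and_eq_false_iff, decide_eq_false_iff_not, not_lt]
        intro o _; omega
      rw [hB]; rfl
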